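-- pv_equiv track=rewrite | github.com/FreeworkEarth/neodepends | examples/TrainTicketSystem_TOY_PYTHON_FIRST/dependencies_files_handcount/compare_neodepends_to_ground_truth.py | _normalize_file_path
-- ===== SOURCE A (Python) =====
-- from typing import Dict, Iterable, List, Optional, Sequence, Set, Tuple
--
-- def _normalize_file_path(raw: str, project_files: Set[str]) -> Optional[str]:
--     """
--     raw may be:
--       - "tts/route.py"
--       - "/tmp/.../tts/route.py"
--       - "namespace/tts/route.py"
--     We try to map it to an exact project file by suffix match.
--     """
--     raw_posix = raw.replace("\\", "/")
--     if raw_posix in project_files: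
--         return raw_posix
--     # pick the longest suffix match
--     best: Optional[str] = None
--     for f in project_files:
--         if raw_posix.endswith("/" + f) or raw_posix.endswith(f):
--             if best is None or len(f) > len(best):
--                 best = f
--     return best
-- ===== SOURCE B (Python) =====
-- def _normalize_file_path(raw, project_files):
--     # A match of A is always a suffix of raw_posix (raw.endswith("/" + f) implies
--     # raw.endswith(f)), and two matching suffixes of equal length are identical.
--     # So the answer is the longest suffix of raw_posix whose length is the length
--     # of some project file and which is itself a project file: try the distinct
--     # candidate lengths in decreasing order, one O(1) set lookup each.
--     raw_posix = raw.replace("\\", "/")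
--     n = len(raw_posix)
--     for l in sorted({len(f) for f in project_files if len(f) <= n}, reverse=True):
--         suffix = raw_posix[n - l:]
--         if suffix in project_files:
--             return suffix
--     return None
-- ===== Notes on version B (the rewrite author's own statement) =====
-- stated objective: alternative
-- what changed: Instead of scanning every project file and keeping the longest endswith-match, B tries the distinct project-file lengths in decreasing order and returns the first suffix of raw_posix of such a length that is in the set (one hash lookup per candidate length, early exit at the longest match).
import Mathlib
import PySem

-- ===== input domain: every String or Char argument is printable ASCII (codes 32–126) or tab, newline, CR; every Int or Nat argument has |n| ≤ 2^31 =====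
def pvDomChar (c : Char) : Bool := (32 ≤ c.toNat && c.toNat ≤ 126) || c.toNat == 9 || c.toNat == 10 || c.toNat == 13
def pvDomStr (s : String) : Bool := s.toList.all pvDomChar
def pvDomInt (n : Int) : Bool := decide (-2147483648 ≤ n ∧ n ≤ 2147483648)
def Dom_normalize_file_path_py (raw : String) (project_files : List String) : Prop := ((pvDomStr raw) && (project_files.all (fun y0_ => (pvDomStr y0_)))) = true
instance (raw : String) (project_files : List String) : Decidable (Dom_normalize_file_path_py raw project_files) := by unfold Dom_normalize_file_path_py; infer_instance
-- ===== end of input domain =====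

-- B replaces A's scan over all project files (keeping the longest endswith-match) by a scan over
-- the suffixes of raw from longest to shortest, returning the first one found in the file set;
-- equivalence of the RETURN VALUES is proved for all inputs.

-- ===== PORT A =====
-- the body of A's 'for f in project_files' loop
def nfpStep (raw_posix : String) (best : Option String) (f : String) : Option String :=
  if PySem.Str.endswith raw_posix ("/" ++ f) || PySem.Str.endswith raw_posix f then
    match best with
    | none => some f
    | some b => if PySem.Str.len f > PySem.Str.len b then some f else best
  else best

def normalize_file_path_py (raw : String) (project_files : List String) : Option String :=
  let raw_posix := PySem.Str.replace raw "\\" "/"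
  if PySem.Set.contains project_files raw_posix then some raw_posix
  else project_files.foldl (nfpStep raw_posix) none

-- ===== PORT B =====
-- B's 'for l in sorted({...}, reverse=True)' loop with its early return
def nfpScan (raw_posix : String) (project_files : List String) : List Int → Option String
  | [] => none
  | l :: rest =>
    if PySem.Set.contains project_files
        (PySem.Str.slice raw_posix (some (PySem.Str.len raw_posix - l)) none) then
      some (PySem.Str.slice raw_posix (some (PySem.Str.len raw_posix - l)) none)
    else nfpScan raw_posix project_files rest

def normalize_file_path_py_alt (raw : String) (project_files : List String) : Option String :=
  let raw_posix := PySem.Str.replace raw "\\" "/"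
  nfpScan raw_posix project_files
    (PySem.List.sorted
      (PySem.Set.ofList
        ((project_files.filter (fun f => PySem.Str.len f ≤ PySem.Str.len raw_posix)).map
          (fun f => PySem.Str.len f)))
      (fun x => x) true)

-- ===== PRECONDITION & SPEC =====
def Spec_normalize_file_path_py (raw : String) (project_files : List String) (out : Option String) : Prop := out = normalize_file_path_py_alt raw project_files
instance (raw : String) (project_files : List String) (out : Option String) : Decidable (Spec_normalize_file_path_py raw project_files out) := by unfold Spec_normalize_file_path_py; infer_instance

-- ===== CLAIM (what is proved, stated in full; the proofs are below) =====
def Claim_equal_normalize_file_path_py : Prop := ∀ (raw : String) (project_files : List String), Dom_normalize_file_path_py raw project_files → Spec_normalize_file_path_py raw project_files (normalize_file_path_py raw project_files)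

-- ===== LEMMAS AND PROOFS =====

-- the suffix of raw_posix that B inspects at index j
def nfpSuf (rp : String) (j : Nat) : String := PySem.Str.slice rp (some (j : Int)) none

lemma nfpSuf_toList (rp : String) (j : Nat) : (nfpSuf rp j).toList = rp.toList.drop j := by
  simp [nfpSuf, pysem]

lemma nfpSuf_eq_of_toList {rp : String} {j : Nat} {f : String}
    (h : (nfpSuf rp j).toList = f.toList) : nfpSuf rp j = f := by
  have := congrArg String.ofList h
  simpa [String.ofList_toList] using this

-- A's loop condition holds exactly when f is a suffix of raw_posix
lemma nfpCond_iff (rp f : String) :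
    (PySem.Str.endswith rp ("/" ++ f) || PySem.Str.endswith rp f) = true ↔ f.toList <:+ rp.toList := by
  simp only [PySem.Str.endswith_eq, Bool.or_eq_true, PySem.Chars.endswith_iff]
  constructor
  · rintro (h | h)
    · exact (List.suffix_cons '/' f.toList).trans (by simpa using h)
    · exact h
  · exact fun h => Or.inr h

-- characterisation of A's fold: every result is a matching element of the list (or the start
-- accumulator), and the result's length dominates every match and the start accumulator
lemma nfpFold_props (rp : String) (pf : List String) : ∀ (acc : Option String),
    (∀ b, acc = some b → b.toList <:+ rp.toList) →
    (∀ b, pf.foldl (nfpStep rp) acc = some b → b.toList <:+ rp.toList ∧ (b ∈ pf ∨ acc = some b))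
    ∧ (∀ f ∈ pf, f.toList <:+ rp.toList →
        ∃ b, pf.foldl (nfpStep rp) acc = some b ∧ f.toList.length ≤ b.toList.length)
    ∧ (∀ b0, acc = some b0 →
        ∃ b, pf.foldl (nfpStep rp) acc = some b ∧ b0.toList.length ≤ b.toList.length) := by
  induction pf with
  | nil =>
    intro acc hacc
    refine ⟨fun b hb => ⟨hacc b hb, Or.inr hb⟩, fun f hf => absurd hf (List.not_mem_nil),
      fun b0 hb0 => ⟨b0, hb0, le_refl _⟩⟩
  | cons f rest ih =>
    intro acc hacc
    have hstep : ∀ b, nfpStep rp acc f = some b → b.toList <:+ rp.toList := by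
      intro b hb
      unfold nfpStep at hb
      by_cases hc : (PySem.Str.endswith rp ("/" ++ f) || PySem.Str.endswith rp f) = true
      · rw [if_pos hc] at hb
        cases hacc' : acc with
        | none => simp [hacc'] at hb; subst hb; exact (nfpCond_iff rp f).mp hc
        | some b0 =>
          rw [hacc'] at hb
          simp only at hb
          split at hb
          · cases hb; exact (nfpCond_iff rp f).mp hc
          · exact hacc b (hacc' ▸ hb)
      · rw [if_neg hc] at hb; exact hacc b hb
    obtain ⟨ih1, ih2, ih3⟩ := ih (nfpStep rp acc f) hstep
    refine ⟨?_, ?_, ?_⟩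
    · intro b hb
      obtain ⟨hm, hor⟩ := ih1 b (by simpa using hb)
      refine ⟨hm, ?_⟩
      rcases hor with h | h
      · exact Or.inl (List.mem_cons_of_mem _ h)
      · -- b came out of the first step: it is f, the old acc, or impossible
        unfold nfpStep at h
        by_cases hc : (PySem.Str.endswith rp ("/" ++ f) || PySem.Str.endswith rp f) = true
        · rw [if_pos hc] at h
          cases hacc' : acc with
          | none => simp [hacc'] at h; exact Or.inl (h ▸ List.mem_cons_self)
          | some b0 =>
            rw [hacc'] at h
            simp only at h
            split at h
            · cases h; exact Or.inl List.mem_cons_self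
            · exact Or.inr (hacc' ▸ h)
        · rw [if_neg hc] at h; exact Or.inr h
    · intro g hg hmg
      rcases List.mem_cons.mp hg with rfl | hg'
      · -- the head itself matches: after the step the accumulator is at least as long as g
        have hc : (PySem.Str.endswith rp ("/" ++ g) || PySem.Str.endswith rp g) = true :=
          (nfpCond_iff rp g).mpr hmg
        have : ∃ c, nfpStep rp acc g = some c ∧ g.toList.length ≤ c.toList.length := by
          unfold nfpStep
          rw [if_pos hc]
          cases hacc' : acc with
          | none => exact ⟨g, rfl, le_refl _⟩
          | some b0 =>
            simp only
            split
            · exact ⟨g, rfl, le_refl _⟩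
            · refine ⟨b0, rfl, ?_⟩
              rename_i hlen
              simp only [PySem.Str.len_eq, gt_iff_lt, not_lt] at hlen
              exact_mod_cast hlen
        obtain ⟨c, hc', hlen⟩ := this
        obtain ⟨b, hb, hlen'⟩ := ih3 c hc'
        exact ⟨b, by simpa using hb, hlen.trans hlen'⟩
      · obtain ⟨b, hb, hlen⟩ := ih2 g hg' hmg
        exact ⟨b, by simpa using hb, hlen⟩
    · intro b0 hb0
      have : ∃ c, nfpStep rp acc f = some c ∧ b0.toList.length ≤ c.toList.length := by
        unfold nfpStep
        subst hb0
        by_cases hc : (PySem.Str.endswith rp ("/" ++ f) || PySem.Str.endswith rp f) = true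
        · rw [if_pos hc]
          simp only
          split
          · rename_i hlen
            simp only [PySem.Str.len_eq, gt_iff_lt] at hlen
            exact ⟨f, rfl, by exact_mod_cast hlen.le⟩
          · exact ⟨b0, rfl, le_refl _⟩
        · rw [if_neg hc]; exact ⟨b0, rfl, le_refl _⟩
      obtain ⟨c, hc', hlen⟩ := this
      obtain ⟨b, hb, hlen'⟩ := ih3 c hc'
      exact ⟨b, by simpa using hb, hlen.trans hlen'⟩

-- B's loop is find? over the mapped index list
lemma nfpScan_none (rp : String) (pf : List String) : ∀ (ls : List Int),
    (∀ l ∈ ls, PySem.Set.contains pf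
        (PySem.Str.slice rp (some (PySem.Str.len rp - l)) none) = false) →
    nfpScan rp pf ls = none := by
  intro ls
  induction ls with
  | nil => intro _; rfl
  | cons l rest ih =>
    intro h
    simp only [nfpScan, h l List.mem_cons_self, Bool.false_eq_true, if_false]
    exact ih (fun x hx => h x (List.mem_cons_of_mem _ hx))

lemma nfpScan_first (rp : String) (pf : List String) : ∀ (ls : List Int) (lstar : Int),
    ls.Pairwise (fun a b => b < a) → lstar ∈ ls →
    PySem.Set.contains pf
      (PySem.Str.slice rp (some (PySem.Str.len rp - lstar)) none) = true →
    (∀ l ∈ ls, lstar < l → PySem.Set.contains pf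
        (PySem.Str.slice rp (some (PySem.Str.len rp - l)) none) = false) →
    nfpScan rp pf ls
      = some (PySem.Str.slice rp (some (PySem.Str.len rp - lstar)) none) := by
  intro ls
  induction ls with
  | nil => intro lstar _ hmem; cases hmem
  | cons h t ih =>
    intro lstar hpw hmem hhit hmin
    rcases List.mem_cons.mp hmem with rfl | hmem'
    · simp only [nfpScan, hhit, if_true]
    · have hlt : lstar < h := (List.pairwise_cons.mp hpw).1 lstar hmem'
      have hf := hmin h List.mem_cons_self hlt
      simp only [nfpScan, hf, Bool.false_eq_true, if_false]
      exact ih lstar (List.pairwise_cons.mp hpw).2 hmem' hhit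
        (fun x hx hx' => hmin x (List.mem_cons_of_mem _ hx) hx')

lemma nfpContra {pf : List String} {x : String} (hc : PySem.Set.contains pf x = false)
    (hm : x ∈ pf) : False := by
  rw [(PySem.Set.contains_iff pf x).mpr hm] at hc
  exact Bool.noConfusion hc

lemma nfpHit_of_match (rp : String) (pf : List String) (f : String) (hf : f ∈ pf)
    (hm : f.toList <:+ rp.toList) :
    nfpSuf rp (rp.toList.length - f.toList.length) = f ∧
      PySem.Set.contains pf (nfpSuf rp (rp.toList.length - f.toList.length)) = true := by
  have hdrop : f.toList = rp.toList.drop (rp.toList.length - f.toList.length) :=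
    List.suffix_iff_eq_drop.mp hm
  have heq : nfpSuf rp (rp.toList.length - f.toList.length) = f :=
    nfpSuf_eq_of_toList (by rw [nfpSuf_toList, ← hdrop])
  refine ⟨heq, ?_⟩
  rw [heq]
  exact (PySem.Set.contains_iff pf f).mpr hf

theorem nfp_main (raw : String) (project_files : List String) :
    normalize_file_path_py raw project_files = normalize_file_path_py_alt raw project_files := by
  unfold normalize_file_path_py normalize_file_path_py_alt
  simp only []
  set rp := PySem.Str.replace raw "\\" "/" with hrp
  set pf := project_files with hpf
  set n := rp.toList.length with hn
  set ls := PySem.List.sorted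
      (PySem.Set.ofList
        ((pf.filter (fun f => PySem.Str.len f ≤ PySem.Str.len rp)).map
          (fun f => PySem.Str.len f)))
      (fun x => x) true with hls
  have hsuf0 : nfpSuf rp 0 = rp := nfpSuf_eq_of_toList (by simp [nfpSuf_toList])
  have hmemls : ∀ l : Int, l ∈ ls ↔ ∃ f, f ∈ pf ∧ PySem.Str.len f = l ∧ l ≤ (n : Int) := by
    intro l
    rw [hls, PySem.List.mem_sorted, PySem.Set.mem_ofList]
    simp only [List.mem_map, List.mem_filter, decide_eq_true_eq, PySem.Str.len_eq]
    constructor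
    · rintro ⟨f, ⟨hf, hle⟩, rfl⟩
      exact ⟨f, hf, rfl, hle⟩
    · rintro ⟨f, hf, rfl, hle⟩
      exact ⟨f, ⟨hf, hle⟩, rfl⟩
  have hbound : ∀ l ∈ ls, 0 ≤ l ∧ l ≤ (n : Int) := by
    intro l hl
    obtain ⟨f, _, hflen, hle⟩ := (hmemls l).mp hl
    refine ⟨?_, hle⟩
    rw [← hflen, PySem.Str.len_eq]
    exact Int.natCast_nonneg _
  have hglsuf : ∀ l ∈ ls,
      PySem.Str.slice rp (some (PySem.Str.len rp - l)) none = nfpSuf rp (n - l.toNat) := by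
    intro l hl
    obtain ⟨h0, hle⟩ := hbound l hl
    unfold nfpSuf
    have harg : PySem.Str.len rp - l = (((n - l.toNat : Nat)) : Int) := by
      rw [PySem.Str.len_eq, ← hn]
      omega
    rw [harg]
  have hstrict : ls.Pairwise (fun a b => b < a) := by
    have h1 : ls.Pairwise (fun a b => b ≤ a) := PySem.List.sorted_pairwise_rev _ _
    have h2 : ls.Nodup :=
      (PySem.List.sorted_perm _ _ _).symm.nodup (PySem.Set.nodup_ofList _)
    exact (h1.and h2).imp (fun hab => lt_of_le_of_ne hab.1 (Ne.symm hab.2))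
  by_cases hex : ∃ j, PySem.Set.contains pf (nfpSuf rp j) = true
  · -- some suffix of rp is a project file
    classical
    set j0 := Nat.find hex with hj0
    have hhit : PySem.Set.contains pf (nfpSuf rp j0) = true := Nat.find_spec hex
    have hmin : ∀ k < j0, PySem.Set.contains pf (nfpSuf rp k) = false := by
      intro k hk
      have := Nat.find_min hex hk
      simpa using this
    have hj0mem : nfpSuf rp j0 ∈ pf := (PySem.Set.contains_iff pf _).mp hhit
    have hj0le : j0 ≤ n := by
      by_contra hgt
      push_neg at hgt
      have hdup : nfpSuf rp n = nfpSuf rp j0 := by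
        apply nfpSuf_eq_of_toList
        rw [nfpSuf_toList, nfpSuf_toList, List.drop_of_length_le (le_refl _),
          List.drop_of_length_le (le_of_lt hgt)]
      have := hmin n hgt
      rw [hdup] at this
      exact nfpContra this hj0mem
    have hlstar_mem : ((n - j0 : Nat) : Int) ∈ ls := by
      apply (hmemls _).mpr
      refine ⟨nfpSuf rp j0, hj0mem, ?_, by exact_mod_cast Nat.sub_le n j0⟩
      rw [PySem.Str.len_eq, nfpSuf_toList, List.length_drop]
    have hslice_star :
        PySem.Str.slice rp (some (PySem.Str.len rp - ((n - j0 : Nat) : Int))) none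
          = nfpSuf rp j0 := by
      have harg : PySem.Str.len rp - ((n - j0 : Nat) : Int) = ((j0 : Nat) : Int) := by
        rw [PySem.Str.len_eq, ← hn]
        omega
      rw [harg]
      rfl
    have hB : nfpScan rp pf ls = some (nfpSuf rp j0) := by
      rw [← hslice_star]
      apply nfpScan_first rp pf ls _ hstrict hlstar_mem
        (by rw [hslice_star]; exact hhit)
      intro l hl hlt
      rw [hglsuf l hl]
      apply hmin
      obtain ⟨h0, hle⟩ := hbound l hl
      omega
    rw [hB]
    -- maximality: any match in pf is at most as long as nfpSuf rp j0
    have hmax : ∀ f ∈ pf, f.toList <:+ rp.toList → f.toList.length ≤ (nfpSuf rp j0).toList.length := by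
      intro f hf hm
      obtain ⟨heq, hhitk⟩ := nfpHit_of_match rp pf f hf hm
      have hle : j0 ≤ n - f.toList.length := Nat.find_min' hex hhitk
      have hflen : f.toList.length ≤ n := hm.length_le
      rw [nfpSuf_toList, List.length_drop]
      omega
    by_cases hin : PySem.Set.contains pf rp = true
    · -- A's fast path: rp itself is a project file, so j0 = 0
      have h0 : PySem.Set.contains pf (nfpSuf rp 0) = true := by rw [hsuf0]; exact hin
      have : j0 = 0 := Nat.le_zero.mp (Nat.find_min' hex h0)
      rw [if_pos hin, this, hsuf0]
    · rw [if_neg hin]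
      obtain ⟨h1, h2, _⟩ := nfpFold_props rp pf none (by intro b hb; cases hb)
      have hm0 : (nfpSuf rp j0).toList <:+ rp.toList := by
        rw [nfpSuf_toList]; exact List.drop_suffix _ _
      obtain ⟨b, hb, hlen⟩ := h2 (nfpSuf rp j0) hj0mem hm0
      obtain ⟨hbm, hbor⟩ := h1 b hb
      have hbpf : b ∈ pf := by rcases hbor with h | h; exact h; cases h
      have hlen' : b.toList.length ≤ (nfpSuf rp j0).toList.length := hmax b hbpf hbm
      have hbeq : b = nfpSuf rp j0 := by
        have h1' := List.suffix_iff_eq_drop.mp hbm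
        have h2' := List.suffix_iff_eq_drop.mp hm0
        have : b.toList = (nfpSuf rp j0).toList := by
          rw [h1', h2', Nat.le_antisymm hlen' hlen]
        have := congrArg String.ofList this
        simpa [String.ofList_toList] using this
      rw [hb, hbeq]
  · -- no suffix of rp is a project file: both sides are none
    push_neg at hex
    have hnone : ∀ j, PySem.Set.contains pf (nfpSuf rp j) = false := by
      intro j; simpa using hex j
    have hB : nfpScan rp pf ls = none := by
      apply nfpScan_none
      intro l hl
      rw [hglsuf l hl]
      exact hnone _
    rw [hB]
    have hin : ¬ PySem.Set.contains pf rp = true := by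
      rw [← hsuf0, hnone 0]; exact Bool.false_ne_true
    rw [if_neg hin]
    obtain ⟨h1, _, _⟩ := nfpFold_props rp pf none (by intro b hb; cases hb)
    cases hfold : pf.foldl (nfpStep rp) none with
    | none => rfl
    | some b =>
      obtain ⟨hbm, hbor⟩ := h1 b hfold
      have hbpf : b ∈ pf := by rcases hbor with h | h; exact h; cases h
      obtain ⟨_, hhitk⟩ := nfpHit_of_match rp pf b hbpf hbm
      exact absurd ((PySem.Set.contains_iff pf _).mp hhitk) (fun hm => nfpContra (hnone _) hm)

-- ===== VERDICT (by name: the statement is the Claim_ definition above) =====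
theorem normalize_file_path_py_spec : Claim_equal_normalize_file_path_py := by
  intro raw project_files _
  exact nfp_main raw project_files
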